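-- pv_equiv track=rewrite | github.com/sophiaas/rlbase | rlbase/discrete_efficient_coding/visualization.py | get_masks
-- ===== SOURCE A (Python) =====
-- def get_masks(reward):
--     masks = []
--     for epoch in reward:
--         for i, step in enumerate(epoch):
--             if i == len(epoch) - 1:
--                 masks.append(0)
--             else:
--                 masks.append(1)
--     return masks
-- ===== SOURCE B (Python) =====
-- def get_masks(reward):
--     # Stage 1: one flat all-ones list for the total number of steps.
--     masks = [1] * sum(len(epoch) for epoch in reward)
--     # Stage 2: punch a 0 at the cumulative end position of each non-empty epoch.
--     pos = 0
--     for epoch in reward: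
--         pos += len(epoch)
--         if len(epoch):
--             masks[pos - 1] = 0
--     return masks
-- ===== Notes on version B (the rewrite author's own statement) =====
-- stated objective: faster
-- what changed: B never emits masks element by element: it allocates one flat all-ones list of total length in a single bulk operation, then a second pass walks the cumulative epoch-end offsets and overwrites a 0 at each non-empty epoch's last index.
import Mathlib
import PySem

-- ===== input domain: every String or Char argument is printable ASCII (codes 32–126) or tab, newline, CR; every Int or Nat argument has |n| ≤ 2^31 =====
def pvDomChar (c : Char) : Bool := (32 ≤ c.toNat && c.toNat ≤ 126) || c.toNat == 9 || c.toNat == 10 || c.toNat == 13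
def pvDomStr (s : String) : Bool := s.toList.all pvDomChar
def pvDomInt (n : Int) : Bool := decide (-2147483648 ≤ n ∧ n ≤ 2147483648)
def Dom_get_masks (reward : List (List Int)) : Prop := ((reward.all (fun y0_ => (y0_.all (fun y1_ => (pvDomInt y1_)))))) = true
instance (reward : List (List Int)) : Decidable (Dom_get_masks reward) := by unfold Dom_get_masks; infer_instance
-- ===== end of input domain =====

-- B allocates one flat all-ones list of total length, then a second pass punches a 0
-- at each non-empty epoch's cumulative end index; return values proved equal to A's.

-- ===== PORT A =====
def get_masks (reward : List (List Int)) : List Int :=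
  reward.foldl (fun masks epoch =>
    (PySem.List.enumerate epoch).foldl (fun m p =>
      if p.1 = (epoch.length : Int) - 1 then m ++ [0] else m ++ [1]) masks) []

-- ===== PORT B =====
def get_masks_alt (reward : List (List Int)) : List Int :=
  let masks := List.replicate ((reward.map List.length).sum) (1 : Int)
  (reward.foldl (fun (st : List Int × Nat) epoch =>
      let pos := st.2 + epoch.length
      if epoch.length ≠ 0 then (st.1.set (pos - 1) 0, pos) else (st.1, pos))
    (masks, 0)).1

-- ===== PRECONDITION & SPEC =====
def Spec_get_masks (reward : List (List Int)) (out : List Int) : Prop := out = get_masks_alt reward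
instance (reward : List (List Int)) (out : List Int) : Decidable (Spec_get_masks reward out) := by unfold Spec_get_masks; infer_instance

-- ===== CLAIM (what is proved, stated in full; the proofs are below) =====
def Claim_equal_get_masks : Prop := ∀ (reward : List (List Int)), Dom_get_masks reward → Spec_get_masks reward (get_masks reward)

-- ===== LEMMAS AND PROOFS =====

-- One epoch of A: the enumerate scan appends exactly the block [1]*(n-1) ++ [0] (nothing for n = 0).
theorem get_masks_inner (e : List Int) (m : List Int) :
    (PySem.List.enumerate e).foldl (fun m p =>
      if p.1 = (e.length : Int) - 1 then m ++ [0] else m ++ [1]) m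
    = m ++ (if e.length = 0 then [] else List.replicate (e.length - 1) 1 ++ [0]) := by
  have h1 : (PySem.List.enumerate e).foldl (fun m p =>
      if p.1 = (e.length : Int) - 1 then m ++ [0] else m ++ [1]) m
      = m ++ (PySem.List.enumerate e).map
          (fun p => if p.1 = (e.length : Int) - 1 then (0 : Int) else 1) := by
    have := PySem.List.foldl_append_singleton_eq_map
      (l := PySem.List.enumerate e)
      (f := fun p => if p.1 = (e.length : Int) - 1 then (0 : Int) else 1) (acc := m)
    rw [← this]
    congr 1
    funext acc p
    split_ifs <;> rfl
  rw [h1]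
  congr 1
  rcases e with _ | ⟨x, xs⟩
  · simp [PySem.List.enumerate]
  · rw [show (if (x :: xs).length = 0 then ([] : List Int)
        else List.replicate ((x :: xs).length - 1) 1 ++ [0])
        = List.replicate xs.length 1 ++ [0] from by simp]
    apply List.ext_getElem
    · simp [PySem.List.length_enumerate]
    · intro k hk hk'
      simp only [List.getElem_map, PySem.List.getElem_enumerate]
      have hk0 : k < xs.length + 1 := by
        simpa [PySem.List.length_enumerate] using hk
      by_cases hke : k = xs.length
      · subst hke
        have hpos : ((0 : Int) + (xs.length : Int)) = ((x :: xs).length : Int) - 1 := by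
          simp
        rw [if_pos hpos]
        rw [List.getElem_append_right (by simp)]
        simp
      · have hklt : k < xs.length := by omega
        have hne : ((0 : Int) + (k : Int)) ≠ ((x :: xs).length : Int) - 1 := by
          simp; omega
        rw [if_neg hne]
        rw [List.getElem_append_left (by simpa using hklt)]
        simp

-- Punching a 0 at index n-1 of an all-ones list of length n+m splits it into the epoch block and the remaining ones.
theorem set_replicate_split (n m : Nat) (hn : n ≠ 0) :
    (List.replicate (n + m) (1 : Int)).set (n - 1) 0
    = (List.replicate (n - 1) 1 ++ [0]) ++ List.replicate m 1 := by
  obtain ⟨k, rfl⟩ : ∃ k, n = k + 1 := ⟨n - 1, by omega⟩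
  have hrep : List.replicate (k + 1 + m) (1 : Int)
      = List.replicate (k + 1 - 1) 1 ++ (1 :: List.replicate m 1) := by
    rw [show k + 1 + m = k + (m + 1) from by omega,
        ← List.replicate_append_replicate, List.replicate_succ]
    simp
  rw [hrep, List.set_append_right _ _ (by simp)]
  simp

-- B's punching pass, generalized: starting from done ++ all-ones-of-remaining with pos = done.length,
-- it produces the same blocks A appends.
theorem alt_loop (rs : List (List Int)) (done : List Int) :
    (rs.foldl (fun (st : List Int × Nat) epoch =>
        let pos := st.2 + epoch.length
        if epoch.length ≠ 0 then (st.1.set (pos - 1) 0, pos) else (st.1, pos))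
      (done ++ List.replicate ((rs.map List.length).sum) (1 : Int), done.length)).1
    = rs.foldl (fun masks epoch =>
        masks ++ (if epoch.length = 0 then [] else List.replicate (epoch.length - 1) 1 ++ [0]))
      done := by
  induction rs generalizing done with
  | nil => simp
  | cons e rest ih =>
    simp only [List.foldl_cons, List.map_cons, List.sum_cons]
    by_cases he : e.length = 0
    · rw [if_neg (by simp [he]), if_pos he]
      simpa [he] using ih done
    · rw [if_pos he, if_neg he]
      have hset : (done ++ List.replicate (e.length + (rest.map List.length).sum) (1 : Int)).set
          (done.length + e.length - 1) 0
          = (done ++ (List.replicate (e.length - 1) 1 ++ [0]))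
            ++ List.replicate ((rest.map List.length).sum) (1 : Int) := by
        rw [List.set_append_right _ _ (by omega)]
        rw [show done.length + e.length - 1 - done.length = e.length - 1 from by omega]
        rw [set_replicate_split _ _ he]
        simp [List.append_assoc]
      have hlen : done.length + e.length
          = (done ++ (List.replicate (e.length - 1) 1 ++ [0])).length := by
        simp; omega
      rw [hset, hlen]
      exact ih _

-- A's whole loop, generalized over the accumulator, appends the per-epoch blocks.
theorem get_masks_outer (rs : List (List Int)) (acc : List Int) :
    rs.foldl (fun masks epoch =>
      (PySem.List.enumerate epoch).foldl (fun m p =>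
        if p.1 = (epoch.length : Int) - 1 then m ++ [0] else m ++ [1]) masks) acc
    = rs.foldl (fun masks epoch =>
        masks ++ (if epoch.length = 0 then [] else List.replicate (epoch.length - 1) 1 ++ [0]))
      acc := by
  induction rs generalizing acc with
  | nil => rfl
  | cons e rest ih =>
    simp only [List.foldl_cons]
    rw [get_masks_inner, ih]

-- ===== VERDICT (by name: the statement is the Claim_ definition above) =====
theorem get_masks_spec : Claim_equal_get_masks := by
  intro reward _
  show get_masks reward = get_masks_alt reward
  unfold get_masks get_masks_alt
  rw [get_masks_outer]
  simpa using (alt_loop reward []).symm
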